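-- pv_equiv track=rewrite | github.com/eliahreeves/spice2sch | main.py | extract_io_from_spice
-- ===== SOURCE A (Python) =====
-- from typing import List, NoReturn, Tuple
--
-- def extract_io_from_spice(subckt_line: str) -> Tuple[List[str], List[str]]:
--     tokens = subckt_line.split()
--     if len(tokens) < 3:
--         raise ValueError("Invalid format")
--
--     ports = tokens[2:]
--
--     power_ground = {"VDD", "VCC", "VSS", "GND", "VGND", "VPWR", "VNB", "VPB"}
--
--     inputs: List[str] = []
--     outputs: List[str] = []
--     found_inputs = False
--
--     for port in ports:
--         is_port_power_ground = port in power_ground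
--         if is_port_power_ground:
--             found_inputs = True
--
--         if not found_inputs or is_port_power_ground:
--             inputs.append(port)
--         else:
--             outputs.append(port)
--     return (inputs, outputs)
-- ===== SOURCE B (Python) =====
-- from typing import List, Tuple
--
-- def extract_io_from_spice(subckt_line: str) -> Tuple[List[str], List[str]]:
--     tokens = subckt_line.split()
--     if len(tokens) < 3:
--         raise ValueError("Invalid format")
--
--     ports = tokens[2:]
--
--     power_ground = {"VDD", "VCC", "VSS", "GND", "VGND", "VPWR", "VNB", "VPB"}
--
--     # split point: first power/ground token (len(ports) if none)
--     first = next((i for i, p in enumerate(ports) if p in power_ground), len(ports))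
--     tail = ports[first:]
--     return (ports[:first] + [p for p in tail if p in power_ground],
--             [p for p in tail if p not in power_ground])
-- ===== Notes on version B (the rewrite author's own statement) =====
-- stated objective: alternative
-- what changed: B has no stateful loop at all: it locates the first power/ground token, keeps the prefix as inputs, and builds the rest by two filters of the tail (power/ground tokens appended to inputs, the others as outputs), instead of A's single pass carrying a found_inputs flag and two accumulators.
import Mathlib
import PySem

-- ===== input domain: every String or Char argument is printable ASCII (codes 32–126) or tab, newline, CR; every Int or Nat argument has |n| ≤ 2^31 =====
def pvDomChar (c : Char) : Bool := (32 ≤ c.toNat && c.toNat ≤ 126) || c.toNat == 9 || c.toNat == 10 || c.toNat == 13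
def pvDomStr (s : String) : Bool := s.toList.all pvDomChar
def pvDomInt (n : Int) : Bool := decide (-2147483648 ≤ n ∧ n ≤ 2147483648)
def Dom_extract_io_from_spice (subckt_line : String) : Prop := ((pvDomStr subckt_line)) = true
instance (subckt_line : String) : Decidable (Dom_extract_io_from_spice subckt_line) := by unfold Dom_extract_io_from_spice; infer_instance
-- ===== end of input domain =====

-- B replaces A's flagged accumulator loop by split-point + two filters of the tail (objective: alternative, same cost).

-- the power_ground set literal of both Pythons
def pvPG : List String := ["VDD", "VCC", "VSS", "GND", "VGND", "VPWR", "VNB", "VPB"]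

-- ===== PORT A =====
-- A's for-loop over ports with state (inputs, outputs, found_inputs)
def pvLoopA : List String → List String → List String → Bool → List String × List String
  | [], inputs, outputs, _ => (inputs, outputs)
  | port :: rest, inputs, outputs, found =>
    let b := pvPG.contains port
    let found' := found || b
    if !found' || b then pvLoopA rest (inputs ++ [port]) outputs found'
    else pvLoopA rest inputs (outputs ++ [port]) found'

def extract_io_from_spice (subckt_line : String) : List String × List String :=
  let tokens := PySem.Str.split₀ subckt_line
  if tokens.length < 3 then ([], [])  -- Python raises ValueError here; excluded by Pre_
  else
    let ports := tokens.drop 2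
    pvLoopA ports [] [] false

-- ===== PORT B =====
def extract_io_from_spice_alt (subckt_line : String) : List String × List String :=
  let tokens := PySem.Str.split₀ subckt_line
  if tokens.length < 3 then ([], [])  -- Python raises ValueError here; excluded by Pre_
  else
    let ports := tokens.drop 2
    let first := ports.findIdx (fun p => pvPG.contains p)  -- next(..., len(ports))
    let tail := ports.drop first
    (ports.take first ++ tail.filter (fun p => pvPG.contains p),
     tail.filter (fun p => !pvPG.contains p))

-- ===== PRECONDITION & SPEC =====
-- exactly the inputs on which A returns (fewer than 3 whitespace-split tokens ⇒ ValueError)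
def Pre_extract_io_from_spice (subckt_line : String) : Prop :=
  3 ≤ (PySem.Str.split₀ subckt_line).length
instance (subckt_line : String) : Decidable (Pre_extract_io_from_spice subckt_line) := by unfold Pre_extract_io_from_spice; infer_instance
def pvWitness_extract_io_from_spice : String := ".subckt inv VDD out in"

def Spec_extract_io_from_spice (subckt_line : String) (out : List String × List String) : Prop := out = extract_io_from_spice_alt subckt_line
instance (subckt_line : String) (out : List String × List String) : Decidable (Spec_extract_io_from_spice subckt_line out) := by unfold Spec_extract_io_from_spice; infer_instance

-- ===== CLAIM (what is proved, stated in full; the proofs are below) =====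
def Claim_equal_extract_io_from_spice : Prop := ∀ (subckt_line : String), Dom_extract_io_from_spice subckt_line → Pre_extract_io_from_spice subckt_line → Spec_extract_io_from_spice subckt_line (extract_io_from_spice subckt_line)

-- ===== LEMMAS AND PROOFS =====

-- once found_inputs is set, A's loop appends the PG tokens to inputs and the rest to outputs
theorem pvLoopA_true (l : List String) : ∀ (ins outs : List String),
    pvLoopA l ins outs true
      = (ins ++ l.filter (fun p => pvPG.contains p),
         outs ++ l.filter (fun p => !pvPG.contains p)) := by
  induction l with
  | nil => intro ins outs; simp [pvLoopA]
  | cons p rest ih =>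
    intro ins outs
    by_cases h : p ∈ pvPG <;> simp [pvLoopA, h, ih, List.filter_cons]

-- before the flag is set, A's loop is the prefix-plus-filtered-tail computation
theorem pvLoopA_false (l : List String) : ∀ (ins outs : List String),
    pvLoopA l ins outs false
      = (ins ++ l.take (l.findIdx (fun p => pvPG.contains p))
            ++ (l.drop (l.findIdx (fun p => pvPG.contains p))).filter (fun p => pvPG.contains p),
         outs ++ (l.drop (l.findIdx (fun p => pvPG.contains p))).filter (fun p => !pvPG.contains p)) := by
  induction l with
  | nil => intro ins outs; simp [pvLoopA]
  | cons p rest ih =>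
    intro ins outs
    by_cases h : p ∈ pvPG
    · simp [pvLoopA, h, List.findIdx_cons, pvLoopA_true]
    · simp [pvLoopA, h, List.findIdx_cons, ih]

-- ===== VERDICT (by name: the statement is the Claim_ definition above) =====
theorem extract_io_from_spice_spec : Claim_equal_extract_io_from_spice := by
  intro s _ hpre
  unfold Pre_extract_io_from_spice at hpre
  unfold Spec_extract_io_from_spice extract_io_from_spice extract_io_from_spice_alt
  have h : ¬ (PySem.Str.split₀ s).length < 3 := by omega
  simp only [h, if_false, pvLoopA_false, List.nil_append]
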